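-- pv_equiv track=rewrite | github.com/acarrasco/programa_conmigo | ep035/aoc_2017_21_opt.py | chunk_grid
-- ===== SOURCE A (Python) =====
-- def extract_chunk(grid, chunk_size, ci, cj):
--     '''
--     >>> extract_chunk(['0123', '4567', '89ab', 'cdef'], 2, 0, 0)
--     '01/45'
--     >>> extract_chunk(['0123', '4567', '89ab', 'cdef'], 2, 1, 1)
--     'ab/ef'
--     '''
--     return '/'.join(''.join(grid[i][j]
--                 for j in range(cj*chunk_size, (cj+1)*chunk_size))
--                 for i in range(ci*chunk_size, (ci+1)*chunk_size))
--
-- def chunk_grid(grid):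
--     '''
--     >>> chunk_grid('12/34')
--     [['12/34']]
--     >>> chunk_grid('0123/4567/89ab/cdef')
--     [['01/45', '23/67'], ['89/cd', 'ab/ef']]
--     >>> chunk_grid('012345/6789ab/cdefgh/ijklmn/opqrst/uvwxyz')
--     [['01/67', '23/89', '45/ab'], ['cd/ij', 'ef/kl', 'gh/mn'], ['op/uv', 'qr/wx', 'st/yz']]
--     >>> chunk_grid('012/345/678')
--     [['012/345/678']]
--     >>> chunk_grid('012345678/9abcdefgh/ijklmnopq/rstuvwxyz/ABCDEFGHI/JKLMNOPQR/STUVWXYZ./!@#$%^&*(/)_+<>?:[]')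
--     [['012/9ab/ijk', '345/cde/lmn', '678/fgh/opq'], ['rst/ABC/JKL', 'uvw/DEF/MNO', 'xyz/GHI/PQR'], ['STU/!@#/)_+', 'VWX/$%^/<>?', 'YZ./&*(/:[]']]
--     '''
--     grid_by_lines = grid.split('/')
--     grid_size = len(grid_by_lines)
--     chunk_size = grid_size % 2 and 3 or 2
--     chunks_per_side = grid_size // chunk_size
--     return [[extract_chunk(grid_by_lines, chunk_size, ci, cj)
--              for cj in range(chunks_per_side)]
--              for ci in range(chunks_per_side)]
-- ===== SOURCE B (Python) =====
-- def chunk_grid(grid):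
--     lines = grid.split('/')
--     n = len(lines)
--     cs = 3 if n % 2 else 2
--     blocks = n // cs
--     # segment table: seg[r][c] = the c-th horizontal slice of line r
--     seg = [[line[c * cs:(c + 1) * cs] for c in range(blocks)] for line in lines]
--     # assemble: band ci takes cs consecutive rows of seg; column cj joins their cj-th segments
--     return [['/'.join(row[cj] for row in seg[ci * cs:(ci + 1) * cs])
--              for cj in range(blocks)]
--             for ci in range(blocks)]
-- ===== Notes on version B (the rewrite author's own statement) =====
-- stated objective: alternative
-- what changed: A computes every output character individually via per-character index arithmetic grid[i][j] over nested ranges; B first builds a segment table by string slicing each line into blocks, then assembles each chunk by joining the cj-th segments of a band of cs rows with '/'.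
-- outside the precondition, e.g. on chunk_grid('/'): A raises IndexError, B returns [['/']]; on chunk_grid('123/45/678'): A raises IndexError, B returns [['123/45/678']]
import Mathlib
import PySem

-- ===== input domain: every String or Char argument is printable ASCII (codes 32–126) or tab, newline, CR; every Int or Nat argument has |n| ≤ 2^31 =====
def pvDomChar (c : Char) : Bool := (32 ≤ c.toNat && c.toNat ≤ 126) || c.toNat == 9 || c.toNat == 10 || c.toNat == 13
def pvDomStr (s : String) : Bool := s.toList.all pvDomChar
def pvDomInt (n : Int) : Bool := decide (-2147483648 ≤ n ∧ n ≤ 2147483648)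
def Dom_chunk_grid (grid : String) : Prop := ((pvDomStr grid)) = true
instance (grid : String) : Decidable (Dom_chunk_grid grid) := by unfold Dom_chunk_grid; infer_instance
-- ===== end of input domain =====

-- B replaces A's per-character index arithmetic by a slice-built segment table plus a
-- band assembly (objective: alternative decomposition, same asymptotic cost).


-- ===== PORT A =====
-- extract_chunk: '/'-join over rows i of the ''.join of the single characters grid[i][j].
-- grid[i][j] is ported as List.pyGetD (in range under Pre_; ''.join of single chars = String.ofList).
def pvExtractChunk (grid : List String) (chunk_size ci cj : Int) : String :=
  PySem.Str.join "/"
    ((PySem.List.pyRange (ci * chunk_size) ((ci + 1) * chunk_size)).map (fun i =>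
      String.ofList
        ((PySem.List.pyRange (cj * chunk_size) ((cj + 1) * chunk_size)).map (fun j =>
          PySem.List.pyGetD (PySem.List.pyGetD grid i "").toList j ' '))))

def chunk_grid (grid : String) : List (List String) :=
  let grid_by_lines := (PySem.Str.split? grid "/").getD []   -- sep "/" ≠ "" : never none
  let grid_size : Int := grid_by_lines.length
  let chunk_size : Int := if PySem.Int.mod grid_size 2 ≠ 0 then 3 else 2
  let chunks_per_side : Int := PySem.Int.floordiv grid_size chunk_size
  (PySem.List.pyRange 0 chunks_per_side).map (fun ci =>
    (PySem.List.pyRange 0 chunks_per_side).map (fun cj =>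
      pvExtractChunk grid_by_lines chunk_size ci cj))

-- ===== PORT B =====
def chunk_grid_alt (grid : String) : List (List String) :=
  let lines := (PySem.Str.split? grid "/").getD []   -- sep "/" ≠ "" : never none
  let n : Int := lines.length
  let cs : Int := if PySem.Int.mod n 2 ≠ 0 then 3 else 2
  let blocks : Int := PySem.Int.floordiv n cs
  let seg : List (List String) := lines.map (fun line =>
    (PySem.List.pyRange 0 blocks).map (fun c =>
      PySem.Str.slice line (some (c * cs)) (some ((c + 1) * cs))))
  (PySem.List.pyRange 0 blocks).map (fun ci =>
    (PySem.List.pyRange 0 blocks).map (fun cj =>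
      PySem.Str.join "/"
        ((PySem.List.slice seg (some (ci * cs)) (some ((ci + 1) * cs))).map (fun row =>
          PySem.List.pyGetD row cj ""))))

-- ===== PRECONDITION & SPEC =====
-- Pre_ excludes exactly the inputs on which A raises IndexError: grids whose first
-- cs*blocks lines are not all at least cs*blocks characters long (ragged/non-square grids).
def Pre_chunk_grid (grid : String) : Prop :=
  let lines := (PySem.Str.split? grid "/").getD []
  let cs := if lines.length % 2 = 0 then 2 else 3
  let m := lines.length / cs * cs
  ∀ line ∈ lines.take m, m ≤ line.toList.length
instance (grid : String) : Decidable (Pre_chunk_grid grid) := by unfold Pre_chunk_grid; infer_instance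

def pvWitness_chunk_grid : String := "0123/4567/89ab/cdef"

def Spec_chunk_grid (grid : String) (out : List (List String)) : Prop := out = chunk_grid_alt grid
instance (grid : String) (out : List (List String)) : Decidable (Spec_chunk_grid grid out) := by unfold Spec_chunk_grid; infer_instance

-- ===== CLAIM (what is proved, stated in full; the proofs are below) =====
def Claim_equal_chunk_grid : Prop := ∀ (grid : String), Dom_chunk_grid grid → Pre_chunk_grid grid → Spec_chunk_grid grid (chunk_grid grid)

-- ===== LEMMAS AND PROOFS =====

-- a clamped drop/take window, written as the list of its (defaulted) elements
lemma pv_drop_take_eq_map_range {α : Type} (L : List α) (a n : Nat) (d : α)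
    (h : a + n ≤ L.length) :
    (L.drop a).take n = (List.range n).map (fun k => L.getD (a + k) d) := by
  apply List.ext_getElem
  · simp; omega
  · intro i h1 h2
    simp only [List.getElem_take, List.getElem_drop, List.getElem_map, List.getElem_range]
    rw [List.getD_eq_getElem]

-- range(a, a+n) as a map over List.range n (Nat endpoints)
lemma pv_pyRange_window (a n : Nat) :
    PySem.List.pyRange (a : Int) ((a : Int) + (n : Int)) =
      (List.range n).map (fun k => ((a + k : Nat) : Int)) := by
  rw [PySem.List.pyRange_one]
  simp

-- ''.join(line[j] for j in range(b, b+n)) equals the slice line[b:b+n] when in range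
lemma pv_chars_window (xs : List Char) (b n : Nat) (h : b + n ≤ xs.length) :
    (PySem.List.pyRange (b : Int) ((b : Int) + (n : Int))).map
        (fun j => PySem.List.pyGetD xs j ' ') =
      (xs.drop b).take n := by
  rw [pv_pyRange_window, pv_drop_take_eq_map_range xs b n ' ' h, List.map_map]
  apply List.map_congr_left
  intro k hk
  simp only [Function.comp_apply]
  rw [PySem.List.pyGetD_natCast]

-- the per-grid equality, for any positive chunk size csN
lemma pv_bands_eq (L : List String) (csN : Nat) (cs : Int) (hcs : cs = (csN : Int))
    (blocks : Int) (hb : blocks = ((L.length / csN : Nat) : Int))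
    (hPre : ∀ line ∈ L.take (L.length / csN * csN),
        L.length / csN * csN ≤ line.toList.length) :
    (PySem.List.pyRange 0 blocks).map (fun ci =>
      (PySem.List.pyRange 0 blocks).map (fun cj =>
        pvExtractChunk L cs ci cj)) =
    (PySem.List.pyRange 0 blocks).map (fun ci =>
      (PySem.List.pyRange 0 blocks).map (fun cj =>
        PySem.Str.join "/"
          ((PySem.List.slice (L.map (fun line =>
              (PySem.List.pyRange 0 blocks).map (fun c =>
                PySem.Str.slice line (some (c * cs)) (some ((c + 1) * cs)))))
              (some (ci * cs)) (some ((ci + 1) * cs))).map (fun row =>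
            PySem.List.pyGetD row cj "")))) := by
  subst hcs hb
  set B := L.length / csN with hB
  have hm : B * csN ≤ L.length := by rw [hB]; exact Nat.div_mul_le_self _ _
  rw [PySem.List.pyRange_zero_nat]
  simp only [List.map_map]
  apply List.map_congr_left
  intro ci hci
  rw [List.mem_range] at hci
  simp only [Function.comp_apply]
  apply List.map_congr_left
  intro cj hcj
  rw [List.mem_range] at hcj
  simp only [Function.comp_apply]
  have e1 : ((ci : Int) * (csN : Int)) = ((ci * csN : Nat) : Int) := by push_cast; ring
  have e2 : (((ci : Int) + 1) * (csN : Int)) = ((ci * csN : Nat) : Int) + (csN : Int) := by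
    push_cast; ring
  have e3 : ((cj : Int) * (csN : Int)) = ((cj * csN : Nat) : Int) := by push_cast; ring
  have e4 : (((cj : Int) + 1) * (csN : Int)) = ((cj * csN : Nat) : Int) + (csN : Int) := by
    push_cast; ring
  have hri : (ci + 1) * csN = ci * csN + csN := by ring
  have hrj : (cj + 1) * csN = cj * csN + csN := by ring
  have hib : (ci + 1) * csN ≤ B * csN := Nat.mul_le_mul_right _ (by omega)
  have hjb : (cj + 1) * csN ≤ B * csN := Nat.mul_le_mul_right _ (by omega)
  have ham : ci * csN + csN ≤ L.length := by omega
  unfold pvExtractChunk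
  rw [e1, e2, PySem.List.slice_natCast_add, pv_pyRange_window, List.map_map,
    ← List.map_drop, ← List.map_take, pv_drop_take_eq_map_range L (ci * csN) csN "" ham]
  simp only [List.map_map]
  congr 1
  apply List.map_congr_left
  intro k hk
  rw [List.mem_range] at hk
  simp only [Function.comp_apply]
  -- the line shared by both sides
  have hlmem : L.getD (ci * csN + k) "" ∈ L.take (B * csN) := by
    rw [List.getD_eq_getElem L "" (by omega), List.mem_take_iff_getElem]
    exact ⟨ci * csN + k, by omega, rfl⟩
  have hlen : cj * csN + csN ≤ (L.getD (ci * csN + k) "").toList.length := by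
    have h1 := hPre _ hlmem
    omega
  rw [PySem.List.pyGetD_natCast L (ci * csN + k) ""]
  rw [e3, e4, pv_chars_window _ _ _ hlen]
  -- B side: pick out segment cj of the row, then identify it with the character window
  rw [PySem.List.pyGetD_natCast, PySem.List.getD_map_range _ _ _ _ hcj]
  simp only [Function.comp_apply]
  rw [e3, e4]
  rw [← String.ofList_toList (s := PySem.Str.slice _ _ _), PySem.Str.toList_slice]
  show String.ofList _ = String.ofList (PySem.List.slice _ _ _)
  rw [PySem.List.slice_natCast_add]

-- ===== VERDICT (by name: the statement is the Claim_ definition above) =====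
theorem chunk_grid_spec : Claim_equal_chunk_grid := by
  intro grid _ hPre
  unfold Spec_chunk_grid
  simp only [chunk_grid, chunk_grid_alt]
  set L := (PySem.Str.split? grid "/").getD [] with hLdef
  set csN : Nat := if L.length % 2 = 0 then 2 else 3 with hcsN
  have hmod : PySem.Int.mod (L.length : Int) 2 = ((L.length % 2 : Nat) : Int) := by
    exact_mod_cast PySem.Int.mod_natCast L.length 2
  have hcs : (if PySem.Int.mod (L.length : Int) 2 ≠ 0 then (3 : Int) else 2) = (csN : Int) := by
    rw [hmod, hcsN]
    by_cases hp : L.length % 2 = 0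
    · simp [hp]
    · simp [hp]
      omega
  have hdiv : PySem.Int.floordiv (L.length : Int)
      (if PySem.Int.mod (L.length : Int) 2 ≠ 0 then (3 : Int) else 2) =
      ((L.length / csN : Nat) : Int) := by
    rw [hcs]; exact_mod_cast PySem.Int.floordiv_natCast L.length csN
  have hPre' : ∀ line ∈ L.take (L.length / csN * csN),
      L.length / csN * csN ≤ line.toList.length := by
    unfold Pre_chunk_grid at hPre
    simpa [hcsN] using hPre
  exact pv_bands_eq L csN _ hcs _ hdiv hPre'
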